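-- pv_equiv track=rewrite | github.com/jak010/study-algorithm-src | Programmers/Level0/240429_코드처리하기.py | solution
-- ===== SOURCE A (Python) =====
-- def solution(code):
--     answer = []
--     mode = '0'
--     for idx, value in enumerate(code):
--
--         if mode == '0':
--             if value != '1' and idx % 2 == 0:
--                 answer.append(value)
--             if value == '1':
--                 mode = '1'
--             continue
--
--         if mode == '1':
--             if value != '1' and idx % 2 != 0:
--                 answer.append(value)
--             if value == '1':
--                 mode = '0'
--             continue
--     if not answer:
--         return "EMPTY"
--
--     return ''.join(answer)
-- ===== SOURCE B (Python) =====
-- def solution(code):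
--     answer = []
--     idx = 0
--     s = 0
--     for seg in code.split('1'):
--         if s > 0:
--             idx += 1
--         for ch in seg:
--             if idx % 2 == s % 2:
--                 answer.append(ch)
--             idx += 1
--         s += 1
--     return ''.join(answer) if answer else "EMPTY"
-- ===== Notes on version B (the rewrite author's own statement) =====
-- stated objective: alternative
-- what changed: A's single-pass mode-toggling state machine is replaced by splitting the string on the toggle character and processing each segment with its index parity and a global position counter.
import Mathlib
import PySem

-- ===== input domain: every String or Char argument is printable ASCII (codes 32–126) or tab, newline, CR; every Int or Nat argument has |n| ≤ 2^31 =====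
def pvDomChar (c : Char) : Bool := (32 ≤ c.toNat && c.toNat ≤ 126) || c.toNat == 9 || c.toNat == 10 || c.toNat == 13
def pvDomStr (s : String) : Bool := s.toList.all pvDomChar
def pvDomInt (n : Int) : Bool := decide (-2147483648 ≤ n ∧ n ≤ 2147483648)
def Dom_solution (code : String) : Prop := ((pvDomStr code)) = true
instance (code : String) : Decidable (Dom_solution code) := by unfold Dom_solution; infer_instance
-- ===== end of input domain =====

-- B replaces A's mode-toggle state machine by split-on-'1' segments processed with a
-- global index counter (objective: alternative decomposition, same cost).

-- ===== PORT A =====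
-- the for-loop over enumerate(code), state (answer, mode)
def pvLoopA : List (Int × Char) → List Char → Char → List Char
  | [], ans, _ => ans
  | (idx, value) :: rest, ans, mode =>
    if mode = '0' then
      let ans := if value ≠ '1' ∧ PySem.Int.mod idx 2 = 0 then ans ++ [value] else ans
      let mode := if value = '1' then '1' else mode
      pvLoopA rest ans mode
    else if mode = '1' then
      let ans := if value ≠ '1' ∧ PySem.Int.mod idx 2 ≠ 0 then ans ++ [value] else ans
      let mode := if value = '1' then '0' else mode
      pvLoopA rest ans mode
    else pvLoopA rest ans mode

def solution (code : String) : String :=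
  let answer := pvLoopA (PySem.List.enumerate code.toList 0) [] '0'
  if answer = [] then "EMPTY" else String.ofList answer

-- ===== PORT B =====
-- hand port of code.split('1') (exact for a single-character separator):
-- returns (first segment, remaining segments)
def pvSplitC : List Char → List Char × List (List Char)
  | [] => ([], [])
  | c :: cs =>
    let (f, r) := pvSplitC cs
    if c = '1' then ([], f :: r) else (c :: f, r)

-- the inner for-loop over one segment's characters; returns (answer, idx)
def pvLoopBseg : List Char → Int → Int → List Char → List Char × Int
  | [], _, idx, ans => (ans, idx)
  | ch :: seg, s, idx, ans =>
    let ans := if PySem.Int.mod idx 2 = PySem.Int.mod s 2 then ans ++ [ch] else ans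
    pvLoopBseg seg s (idx + 1) ans

-- the outer for-loop over the segments, state (answer, idx, s)
def pvLoopB : List (List Char) → Int → Int → List Char → List Char
  | [], _, _, ans => ans
  | seg :: rest, s, idx, ans =>
    let idx := if 0 < s then idx + 1 else idx
    let p := pvLoopBseg seg s idx ans
    pvLoopB rest (s + 1) p.2 p.1

def solution_alt (code : String) : String :=
  let segs := pvSplitC code.toList
  let answer := pvLoopB (segs.1 :: segs.2) 0 0 []
  if answer = [] then "EMPTY" else String.ofList answer

-- ===== PRECONDITION & SPEC =====
def Spec_solution (code : String) (out : String) : Prop := out = solution_alt code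
instance (code : String) (out : String) : Decidable (Spec_solution code out) := by unfold Spec_solution; infer_instance

-- ===== CLAIM (what is proved, stated in full; the proofs are below) =====
def Claim_equal_solution : Prop := ∀ (code : String), Dom_solution code → Spec_solution code (solution code)

-- ===== LEMMAS AND PROOFS =====

-- proof-side variant of pvLoopB: idx passed in already points at the segment's first
-- character, and the '+1' for the consumed delimiter is added after each segment
def pvLoopB' : List (List Char) → Int → Int → List Char → List Char
  | [], _, _, ans => ans
  | seg :: rest, s, idx, ans =>
    let p := pvLoopBseg seg s idx ans
    pvLoopB' rest (s + 1) (p.2 + 1) p.1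

theorem pvLoopB_eq_loopB' (segs : List (List Char)) (s idx : Int) (ans : List Char)
    (hs : 0 ≤ s) :
    pvLoopB segs s idx ans = pvLoopB' segs s (if 0 < s then idx + 1 else idx) ans := by
  induction segs generalizing s idx ans with
  | nil => rfl
  | cons seg rest ih =>
    simp only [pvLoopB, pvLoopB']
    rw [ih _ _ _ (by omega), if_pos (by omega : (0:Int) < s + 1)]

theorem pvMain (l : List Char) (s i : Int) (ans : List Char) (hs : 0 ≤ s) :
    pvLoopB' ((pvSplitC l).1 :: (pvSplitC l).2) s i ans
      = pvLoopA (PySem.List.enumerate l i) ans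
          (if PySem.Int.mod s 2 = 1 then '1' else '0') := by
  induction l generalizing s i ans with
  | nil =>
    simp [pvSplitC, pvLoopB', pvLoopBseg, PySem.List.enumerate, pvLoopA]
  | cons c cs ih =>
    have hmod : PySem.Int.mod s 2 = 0 ∨ PySem.Int.mod s 2 = 1 := by
      simp [PySem.Int.mod, Int.fmod_eq_emod]; omega
    have hsucc0 : PySem.Int.mod s 2 = 0 → PySem.Int.mod (s + 1) 2 = 1 := by
      simp [PySem.Int.mod, Int.fmod_eq_emod]; omega
    have hsucc1 : PySem.Int.mod s 2 = 1 → PySem.Int.mod (s + 1) 2 = 0 := by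
      simp [PySem.Int.mod, Int.fmod_eq_emod]; omega
    by_cases hc : c = '1'
    · -- delimiter: empty current segment, flip parity
      subst hc
      cases hsp : pvSplitC cs with
      | mk f r =>
        have hsp1 : pvSplitC ('1' :: cs) = ([], f :: r) := by simp [pvSplitC, hsp]
        have hih : pvLoopB' (f :: r) (s + 1) (i + 1) ans
            = pvLoopA (PySem.List.enumerate cs (i + 1)) ans
                (if PySem.Int.mod (s + 1) 2 = 1 then '1' else '0') := by
          have h := ih (s + 1) (i + 1) ans (by omega)
          rw [hsp] at h; exact h
        have hred : pvLoopB' ([] :: f :: r) s i ans = pvLoopB' (f :: r) (s + 1) (i + 1) ans := by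
          simp [pvLoopB', pvLoopBseg]
        rw [hsp1, hred, hih, PySem.List.enumerate_cons]
        rcases hmod with hm | hm
        · rw [show (if PySem.Int.mod s 2 = 1 then '1' else '0') = '0' from by rw [hm]; norm_num,
            show (if PySem.Int.mod (s + 1) 2 = 1 then '1' else '0') = '1' from by rw [hsucc0 hm]; norm_num]
          simp [pvLoopA]
        · rw [show (if PySem.Int.mod s 2 = 1 then '1' else '0') = '1' from by rw [hm]; norm_num,
            show (if PySem.Int.mod (s + 1) 2 = 1 then '1' else '0') = '0' from by rw [hsucc1 hm]; norm_num]
          simp [pvLoopA]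
    · -- ordinary character: goes onto the current segment
      simp only [pvSplitC]
      cases hsp : pvSplitC cs with
      | mk f r =>
        simp only [if_neg hc, pvLoopB', pvLoopBseg, PySem.List.enumerate_cons]
        have hstep : ∀ a,
            pvLoopB' r (s + 1) ((pvLoopBseg f s (i + 1) a).2 + 1) (pvLoopBseg f s (i + 1) a).1
              = pvLoopB' (f :: r) s (i + 1) a := by
          intro a; simp [pvLoopB']
        set ans' := if PySem.Int.mod i 2 = PySem.Int.mod s 2 then ans ++ [c] else ans with hans'
        have hih := ih s (i + 1) ans' hs
        rw [hsp] at hih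
        rw [hstep]
        have hi2 : PySem.Int.mod i 2 = 0 ∨ PySem.Int.mod i 2 = 1 := by
          simp [PySem.Int.mod, Int.fmod_eq_emod]; omega
        rcases hmod with hm | hm
        · have hmode : (if PySem.Int.mod s 2 = 1 then '1' else '0') = '0' := by
            rw [hm]; norm_num
          rw [hmode] at hih ⊢
          rw [hih]
          simp only [pvLoopA]
          norm_num [hc]
          congr 1
          rcases hi2 with hi | hi <;> rw [hans', hm, hi] <;> norm_num <;> simp [PySem.Int.mod, Int.fmod_eq_emod] at hi <;> omega
        · have hmode : (if PySem.Int.mod s 2 = 1 then '1' else '0') = '1' := by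
            rw [hm]; norm_num
          rw [hmode] at hih ⊢
          rw [hih]
          simp only [pvLoopA]
          norm_num [hc]
          congr 1
          rcases hi2 with hi | hi <;> rw [hans', hm, hi] <;> norm_num <;> simp [PySem.Int.mod, Int.fmod_eq_emod] at hi <;> omega

-- ===== VERDICT (by name: the statement is the Claim_ definition above) =====
theorem solution_spec : Claim_equal_solution := by
  intro code _
  have h : pvLoopB ((pvSplitC code.toList).1 :: (pvSplitC code.toList).2) 0 0 []
      = pvLoopA (PySem.List.enumerate code.toList) [] '0' := by
    rw [pvLoopB_eq_loopB' _ _ _ _ le_rfl]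
    simp only [show ¬(0:Int) < 0 from by omega, if_false]
    rw [pvMain code.toList 0 0 [] le_rfl]
    simp [PySem.Int.mod]
  simp only [Spec_solution, solution, solution_alt, h]
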